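-- pv_equiv track=rewrite | github.com/sa1g/nlu | SA/part_1/functions.py | tag2ts1
-- ===== SOURCE A (Python) =====
-- def tag2ts1(ts_tag_sequence):
--     """
--     Transform ts tag sequence to target spans
--     :param ts_tag_sequence: tag sequence with 'T' and 'O'
--     :return: List of (start, end) tuples for target spans
--     """
--     n_tags = len(ts_tag_sequence)
--     ts_sequence = []
--     beg, end = -1, -1
--     for i in range(n_tags):
--         ts_tag = ts_tag_sequence[i]
--         if ts_tag == "T":
--             if beg == -1:
--                 beg = i
--             end = i
--         elif ts_tag == "O" and beg != -1:
--             ts_sequence.append((beg, end))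
--             beg, end = -1, -1
--     if beg != -1:
--         ts_sequence.append((beg, end))
--     return ts_sequence
-- ===== SOURCE B (Python) =====
-- def tag2ts1(ts_tag_sequence):
--     """
--     Transform ts tag sequence to target spans
--     :param ts_tag_sequence: tag sequence with 'T' and 'O'
--     :return: List of (start, end) tuples for target spans
--     """
--     spans = []
--     it = iter(enumerate(ts_tag_sequence))
--     for i, tag in it:
--         if tag != "T":
--             continue
--         start = last = i
--         for j, t in it:
--             if t == "O":
--                 break
--             if t == "T":
--                 last = j
--         spans.append((start, last))
--     return spans
-- ===== Notes on version B (the rewrite author's own statement) =====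
-- stated objective: alternative
-- what changed: Replaces A's single-pass flag state machine (beg/end sentinels, close-on-O, final flush) with a two-phase consumer over one shared enumerate iterator: an outer loop skips to the next 'T', an inner loop extends the span until an 'O' closes it, emitting each (start,last) where it completes.
import Mathlib
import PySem

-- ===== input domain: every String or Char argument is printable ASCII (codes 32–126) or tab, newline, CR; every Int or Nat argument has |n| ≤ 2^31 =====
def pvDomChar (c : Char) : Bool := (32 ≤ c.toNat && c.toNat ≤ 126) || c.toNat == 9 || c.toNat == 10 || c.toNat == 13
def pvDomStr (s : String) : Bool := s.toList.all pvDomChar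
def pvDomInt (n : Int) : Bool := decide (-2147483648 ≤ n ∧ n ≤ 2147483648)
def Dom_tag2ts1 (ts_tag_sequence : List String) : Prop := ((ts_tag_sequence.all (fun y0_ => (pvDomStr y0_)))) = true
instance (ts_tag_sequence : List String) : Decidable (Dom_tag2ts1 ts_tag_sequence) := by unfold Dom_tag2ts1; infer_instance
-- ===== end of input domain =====

-- B replaces A's flag state machine (beg/end sentinels, close-on-'O', final flush) with a
-- two-phase consumer of one shared iterator: skip to the next 'T', extend until 'O', emit; objective: alternative.

-- ===== PORT A =====
def tag2ts1 (ts_tag_sequence : List String) : List (Int × Int) :=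
  let n_tags : Int := PySem.List.len ts_tag_sequence
  let st := (PySem.List.pyRange 0 n_tags 1).foldl
    (fun (st : List (Int × Int) × Int × Int) i =>
      -- i ranges over range(n_tags), always in range, so the default "" is never used
      let ts_tag := PySem.List.pyGetD ts_tag_sequence i ""
      if ts_tag = "T" then
        (st.1, (if st.2.1 = -1 then i else st.2.1), i)
      else if ts_tag = "O" ∧ st.2.1 ≠ -1 then
        (st.1 ++ [(st.2.1, st.2.2)], -1, -1)
      else st)
    ([], -1, -1)
  if st.2.1 ≠ -1 then st.1 ++ [(st.2.1, st.2.2)] else st.1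

-- ===== PORT B =====
-- outer loop of Source B: advance the shared iterator to the next 'T'
mutual
def tag2ts1AltOuter : List (Int × String) → List (Int × Int)
  | [] => []
  | (i, tag) :: rest =>
    if tag ≠ "T" then tag2ts1AltOuter rest
    else tag2ts1AltInner rest i i
-- inner loop of Source B: extend the current span until an 'O' closes it (emit on break / iterator end)
def tag2ts1AltInner : List (Int × String) → Int → Int → List (Int × Int)
  | [], start, last => [(start, last)]
  | (j, t) :: rest, start, last =>
    if t = "O" then (start, last) :: tag2ts1AltOuter rest
    else if t = "T" then tag2ts1AltInner rest start j
    else tag2ts1AltInner rest start last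
end

def tag2ts1_alt (ts_tag_sequence : List String) : List (Int × Int) :=
  tag2ts1AltOuter (PySem.List.enumerate ts_tag_sequence)

-- ===== PRECONDITION & SPEC =====
def Spec_tag2ts1 (ts_tag_sequence : List String) (out : List (Int × Int)) : Prop := out = tag2ts1_alt ts_tag_sequence
instance (ts_tag_sequence : List String) (out : List (Int × Int)) : Decidable (Spec_tag2ts1 ts_tag_sequence out) := by unfold Spec_tag2ts1; infer_instance

-- ===== CLAIM (what is proved, stated in full; the proofs are below) =====
def Claim_equal_tag2ts1 : Prop := ∀ (ts_tag_sequence : List String), Dom_tag2ts1 ts_tag_sequence → Spec_tag2ts1 ts_tag_sequence (tag2ts1 ts_tag_sequence)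

-- ===== LEMMAS AND PROOFS =====

-- A's loop body, as a function of the (index, tag) pair
def stepE (st : List (Int × Int) × Int × Int) (p : Int × String) : List (Int × Int) × Int × Int :=
  if p.2 = "T" then
    (st.1, (if st.2.1 = -1 then p.1 else st.2.1), p.1)
  else if p.2 = "O" ∧ st.2.1 ≠ -1 then
    (st.1 ++ [(st.2.1, st.2.2)], -1, -1)
  else st

-- A's final flush
def flushE (st : List (Int × Int) × Int × Int) : List (Int × Int) :=
  if st.2.1 ≠ -1 then st.1 ++ [(st.2.1, st.2.2)] else st.1

lemma tag2ts1_eq_foldl_enumerate (l : List String) :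
    tag2ts1 l = flushE ((PySem.List.enumerate l).foldl stepE ([], -1, -1)) := by
  rw [tag2ts1, flushE, PySem.List.enumerate_eq_map_pyRange (d := ""), List.foldl_map]
  rfl

lemma main_invariant (ps : List (Int × String)) (hps : ∀ p ∈ ps, (0:Int) ≤ p.1) :
    (∀ acc, flushE (ps.foldl stepE (acc, -1, -1)) = acc ++ tag2ts1AltOuter ps)
  ∧ (∀ acc s e, s ≠ -1 →
      flushE (ps.foldl stepE (acc, s, e)) = acc ++ tag2ts1AltInner ps s e) := by
  induction ps with
  | nil =>
    refine ⟨fun acc => ?_, fun acc s e hs => ?_⟩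
    · simp [flushE, tag2ts1AltOuter]
    · simp [flushE, tag2ts1AltInner, hs]
  | cons p rest ih =>
    obtain ⟨i, t⟩ := p
    have h0 : (0:Int) ≤ i := hps (i, t) (by simp)
    obtain ⟨ihO, ihI⟩ := ih (fun q hq => hps q (List.mem_cons_of_mem _ hq))
    constructor
    · intro acc
      by_cases hT : t = "T"
      · have hi : i ≠ -1 := by omega
        simp only [List.foldl_cons, stepE, hT, if_pos rfl]
        simp only [tag2ts1AltOuter, hT]
        simpa using ihI acc i i hi
      · have hstep : stepE (acc, -1, -1) (i, t) = (acc, -1, -1) := by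
          simp [stepE, hT]
        simp only [List.foldl_cons, hstep, tag2ts1AltOuter]
        rw [if_pos hT]
        exact ihO acc
    · intro acc s e hs
      by_cases hT : t = "T"
      · simp only [List.foldl_cons, stepE, hT, if_pos rfl, if_neg hs]
        simp only [tag2ts1AltInner, hT]
        simpa using ihI acc s i hs
      · by_cases hO : t = "O"
        · have hstep : stepE (acc, s, e) (i, t) = (acc ++ [(s, e)], -1, -1) := by
            simp [stepE, hT, hO, hs]
          simp only [List.foldl_cons, hstep]
          simp only [tag2ts1AltInner, hO, hT]
          rw [ihO (acc ++ [(s, e)])]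
          simp
        · have hstep : stepE (acc, s, e) (i, t) = (acc, s, e) := by
            simp [stepE, hT, hO]
          simp only [List.foldl_cons, hstep]
          simp only [tag2ts1AltInner, hO, hT]
          simp [ihI acc s e hs, hO, hT]

lemma enumerate_fst_nonneg (l : List String) :
    ∀ p ∈ PySem.List.enumerate l, (0:Int) ≤ p.1 := by
  intro p hp
  rw [PySem.List.mem_enumerate_iff] at hp
  obtain ⟨k, hk, rfl⟩ := hp
  simp

-- ===== VERDICT (by name: the statement is the Claim_ definition above) =====
theorem tag2ts1_spec : Claim_equal_tag2ts1 := by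
  intro l _
  unfold Spec_tag2ts1 tag2ts1_alt
  rw [tag2ts1_eq_foldl_enumerate]
  simpa using (main_invariant (PySem.List.enumerate l) (enumerate_fst_nonneg l)).1 []
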